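-- pv_equiv track=rewrite | github.com/greensec/pynsd | tests/test_integration.py | _parse_zonestatus_output
-- ===== SOURCE A (Python) =====
-- from typing import Dict, Iterator, List
--
-- def _parse_zonestatus_output(raw: str) -> Dict[str, Dict[str, str]]:
--     zones: Dict[str, Dict[str, str]] = {}
--     current_zone = ""
--
--     for line in raw.splitlines():
--         stripped = line.strip()
--         if not stripped or stripped == "ok":
--             continue
--         if stripped.startswith("zone:"):
--             _, zone_name = stripped.split(":", 1)
--             current_zone = zone_name.strip()
--             zones[current_zone] = {}
--             continue
--         if ":" not in stripped and "=" not in stripped and not stripped.startswith("["):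
--             current_zone = stripped
--             zones[current_zone] = {}
--             continue
--
--         if current_zone and ":" in stripped:
--             key, value = stripped.split(":", 1)
--             zones[current_zone][key.strip()] = value.strip()
--
--     return zones
-- ===== SOURCE B (Python) =====
-- # Two-phase reimplementation: pass 1 partitions the report into zone segments
-- # (header + body lines), pass 2 builds one nested dict per segment.
-- def _parse_zonestatus_output(raw):
--     # pass 1: split the report into segments, one per zone header
--     segments = []
--     for line in raw.splitlines():
--         s = line.strip()
--         if not s or s == "ok":
--             continue
--         if s.startswith("zone:"):
--             segments.append((s.split(":", 1)[1].strip(), []))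
--         elif ":" not in s and "=" not in s and not s.startswith("["):
--             segments.append((s, []))
--         elif segments:
--             segments[-1][1].append(s)
--     # pass 2: one nested dict per segment (later duplicate names overwrite)
--     zones = {}
--     for name, body in segments:
--         d = {}
--         for s in body:
--             if ":" in s:
--                 key, value = s.split(":", 1)
--                 d[key.strip()] = value.strip()
--         zones[name] = d
--     return zones
-- ===== Notes on version B (the rewrite author's own statement) =====
-- stated objective: alternative
-- what changed: A's single interleaved stateful loop is replaced by two passes: pass 1 partitions the stripped lines into (zone-name, body-lines) segments, pass 2 builds one nested dict per segment.
-- outside the precondition, e.g. on _parse_zonestatus_output('zone:\na: b'): A returns {'': {}}, B returns {'': {'a': 'b'}}; on _parse_zonestatus_output('zone:'): A returns {'': {}}, B returns {'': {}}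
import Mathlib
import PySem

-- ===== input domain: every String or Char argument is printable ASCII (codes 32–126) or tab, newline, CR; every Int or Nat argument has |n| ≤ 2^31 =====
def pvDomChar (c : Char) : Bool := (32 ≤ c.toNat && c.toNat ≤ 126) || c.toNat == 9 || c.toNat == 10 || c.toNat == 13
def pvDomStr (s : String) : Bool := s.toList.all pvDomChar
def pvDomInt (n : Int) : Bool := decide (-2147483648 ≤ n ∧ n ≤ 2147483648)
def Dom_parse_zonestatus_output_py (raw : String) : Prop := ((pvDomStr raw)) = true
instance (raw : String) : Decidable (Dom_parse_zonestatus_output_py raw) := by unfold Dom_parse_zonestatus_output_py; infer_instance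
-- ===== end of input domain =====

-- B re-implements the parser as two passes (partition into zone segments, then build the
-- nested dict per segment) instead of A's single interleaved stateful loop; return value only.

-- ===== PORT A =====
-- loop body of A's single for-loop: state = (zones, current_zone)
def pzoStepA (acc : PySem.Dict String (PySem.Dict String String) × String) (line : String) :
    PySem.Dict String (PySem.Dict String String) × String :=
  let stripped := PySem.Str.strip line
  if stripped == "" || stripped == "ok" then acc
  else if PySem.Str.startswith stripped "zone:" then
    -- stripped.split(":", 1)[1]: the startswith guard guarantees the two-element shape
    let zone_name := ((PySem.Str.splitMax? stripped ":" 1).getD []).getD 1 ""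
    let cz := PySem.Str.strip zone_name
    (acc.1.insert cz PySem.Dict.empty, cz)
  else if !PySem.Str.isIn ":" stripped && !PySem.Str.isIn "=" stripped
          && !PySem.Str.startswith stripped "[" then
    (acc.1.insert stripped PySem.Dict.empty, stripped)
  else if acc.2 != "" && PySem.Str.isIn ":" stripped then
    -- key, value = stripped.split(":", 1); zones[current_zone][key.strip()] = value.strip()
    let parts := (PySem.Str.splitMax? stripped ":" 1).getD []
    (acc.1.modify acc.2 PySem.Dict.empty
       (fun d => d.insert (PySem.Str.strip (parts.getD 0 "")) (PySem.Str.strip (parts.getD 1 ""))),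
     acc.2)
  else acc

def parse_zonestatus_output_py (raw : String) : List (String × List (String × String)) :=
  let st := (PySem.Str.splitlines raw).foldl pzoStepA (PySem.Dict.empty, "")
  st.1.items.map (fun p => (p.1, p.2.items))

-- ===== PORT B =====
-- pass 1 loop body: segments = list of (zone name, body lines); a body line attaches to the last segment
def pzoStepB (segs : List (String × List String)) (line : String) : List (String × List String) :=
  let s := PySem.Str.strip line
  if s == "" || s == "ok" then segs
  else if PySem.Str.startswith s "zone:" then
    segs ++ [(PySem.Str.strip (((PySem.Str.splitMax? s ":" 1).getD []).getD 1 ""), [])]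
  else if !PySem.Str.isIn ":" s && !PySem.Str.isIn "=" s && !PySem.Str.startswith s "[" then
    segs ++ [(s, [])]
  else
    match segs.getLast? with                      -- "elif segments: segments[-1][1].append(s)"
    | some (n, b) => segs.dropLast ++ [(n, b ++ [s])]
    | none => segs

-- pass 2 inner loop: the dict of one segment's body
def pzoBody (body : List String) : PySem.Dict String String :=
  body.foldl (fun d s =>
    if PySem.Str.isIn ":" s then
      let parts := (PySem.Str.splitMax? s ":" 1).getD []
      d.insert (PySem.Str.strip (parts.getD 0 "")) (PySem.Str.strip (parts.getD 1 ""))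
    else d) PySem.Dict.empty

-- pass 2 outer loop: zones[name] = d, in segment order
def pzoBuild (segs : List (String × List String)) : PySem.Dict String (PySem.Dict String String) :=
  segs.foldl (fun z seg => z.insert seg.1 (pzoBody seg.2)) PySem.Dict.empty

def parse_zonestatus_output_py_alt (raw : String) : List (String × List (String × String)) :=
  let segments := (PySem.Str.splitlines raw).foldl pzoStepB []
  (pzoBuild segments).items.map (fun p => (p.1, p.2.items))

-- ===== PRECONDITION & SPEC =====
-- Pre_ excludes raws containing a 'zone:' header whose zone name strips to empty: there A's
-- falsy-string current_zone guard silently discards the following key:value lines while B files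
-- them under the empty name — a degenerate header on which either behaviour is defensible.
def Pre_parse_zonestatus_output_py (raw : String) : Prop :=
  ∀ line ∈ PySem.Str.splitlines raw,
    PySem.Str.startswith (PySem.Str.strip line) "zone:" = true →
    PySem.Str.strip (((PySem.Str.splitMax? (PySem.Str.strip line) ":" 1).getD []).getD 1 "") ≠ ""
instance (raw : String) : Decidable (Pre_parse_zonestatus_output_py raw) := by
  unfold Pre_parse_zonestatus_output_py; infer_instance

def pvWitness_parse_zonestatus_output_py : String :=
  "zone: example.com\n  state: ok\n  served-serial: \"123\"\nother.org\n[stats]\nok"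

def Spec_parse_zonestatus_output_py (raw : String) (out : List (String × List (String × String))) : Prop := out = parse_zonestatus_output_py_alt raw
instance (raw : String) (out : List (String × List (String × String))) : Decidable (Spec_parse_zonestatus_output_py raw out) := by unfold Spec_parse_zonestatus_output_py; infer_instance

-- ===== CLAIM (what is proved, stated in full; the proofs are below) =====
def Claim_equal_parse_zonestatus_output_py : Prop := ∀ (raw : String), Dom_parse_zonestatus_output_py raw → Pre_parse_zonestatus_output_py raw → Spec_parse_zonestatus_output_py raw (parse_zonestatus_output_py raw)

-- ===== LEMMAS AND PROOFS =====

-- the name of the open (= last) segment; "" when no segment is open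
def pzoLast (segs : List (String × List String)) : String :=
  (segs.getLast?).elim "" Prod.fst

theorem pzoBuild_concat (segs : List (String × List String)) (n : String) (b : List String) :
    pzoBuild (segs ++ [(n, b)]) = (pzoBuild segs).insert n (pzoBody b) := by
  simp [pzoBuild, List.foldl_append]

theorem pzoLast_concat (segs : List (String × List String)) (n : String) (b : List String) :
    pzoLast (segs ++ [(n, b)]) = n := by
  simp [pzoLast]

-- main invariant: A's running state is determined by B's running segment list
theorem pzo_main (lines : List String) (segs : List (String × List String))
    (h : ∀ line ∈ lines,
      PySem.Str.startswith (PySem.Str.strip line) "zone:" = true →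
      PySem.Str.strip (((PySem.Str.splitMax? (PySem.Str.strip line) ":" 1).getD []).getD 1 "") ≠ "")
    (hn : ∀ p ∈ segs, p.1 ≠ "") :
    lines.foldl pzoStepA (pzoBuild segs, pzoLast segs)
      = (pzoBuild (lines.foldl pzoStepB segs), pzoLast (lines.foldl pzoStepB segs)) := by
  induction lines generalizing segs with
  | nil => rfl
  | cons line rest ih =>
    have hline := h line (by simp)
    have hrest : ∀ l ∈ rest,
        PySem.Str.startswith (PySem.Str.strip l) "zone:" = true →
        PySem.Str.strip (((PySem.Str.splitMax? (PySem.Str.strip l) ":" 1).getD []).getD 1 "") ≠ "" :=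
      fun l hl => h l (by simp [hl])
    simp only [List.foldl_cons]
    by_cases h1 : (PySem.Str.strip line == "" || PySem.Str.strip line == "ok") = true
    · -- blank / "ok": both loops skip the line
      have eA : pzoStepA (pzoBuild segs, pzoLast segs) line = (pzoBuild segs, pzoLast segs) := by
        unfold pzoStepA; rw [if_pos h1]
      have eB : pzoStepB segs line = segs := by
        unfold pzoStepB; rw [if_pos h1]
      rw [eA, eB]; exact ih segs hrest hn
    · by_cases h2 : PySem.Str.startswith (PySem.Str.strip line) "zone:" = true
      · -- "zone:" header: open a fresh segment / fresh empty zone dict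
        have eA : pzoStepA (pzoBuild segs, pzoLast segs) line
            = ((pzoBuild segs).insert
                (PySem.Str.strip (((PySem.Str.splitMax? (PySem.Str.strip line) ":" 1).getD []).getD 1 ""))
                PySem.Dict.empty,
               PySem.Str.strip (((PySem.Str.splitMax? (PySem.Str.strip line) ":" 1).getD []).getD 1 "")) := by
          unfold pzoStepA; rw [if_neg h1, if_pos h2]
        have eB : pzoStepB segs line = segs
            ++ [(PySem.Str.strip (((PySem.Str.splitMax? (PySem.Str.strip line) ":" 1).getD []).getD 1 ""), [])] := by
          unfold pzoStepB; rw [if_neg h1, if_pos h2]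
        have key := ih (segs
            ++ [(PySem.Str.strip (((PySem.Str.splitMax? (PySem.Str.strip line) ":" 1).getD []).getD 1 ""), [])])
          hrest (by
            intro p hp
            rcases List.mem_append.mp hp with hp | hp
            · exact hn p hp
            · simp at hp; subst hp; exact hline h2)
        rw [pzoBuild_concat, pzoLast_concat,
          show pzoBody ([] : List String) = PySem.Dict.empty from rfl] at key
        rw [eA, eB]
        exact key
      · by_cases h3 : (!PySem.Str.isIn ":" (PySem.Str.strip line)
            && !PySem.Str.isIn "=" (PySem.Str.strip line)
            && !PySem.Str.startswith (PySem.Str.strip line) "[") = true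
        · -- bare header line (no ':' and no '=', not a '[' line)
          have hne : PySem.Str.strip line ≠ "" := by
            intro hcon; rw [hcon] at h1; simp at h1
          have eA : pzoStepA (pzoBuild segs, pzoLast segs) line
              = ((pzoBuild segs).insert (PySem.Str.strip line) PySem.Dict.empty,
                 PySem.Str.strip line) := by
            unfold pzoStepA; rw [if_neg h1, if_neg h2, if_pos h3]
          have eB : pzoStepB segs line = segs ++ [(PySem.Str.strip line, [])] := by
            unfold pzoStepB; rw [if_neg h1, if_neg h2, if_pos h3]
          have key := ih (segs ++ [(PySem.Str.strip line, [])]) hrest (by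
            intro p hp
            rcases List.mem_append.mp hp with hp | hp
            · exact hn p hp
            · simp at hp; subst hp; exact hne)
          rw [pzoBuild_concat, pzoLast_concat,
            show pzoBody ([] : List String) = PySem.Dict.empty from rfl] at key
          rw [eA, eB]
          exact key
        · -- body line: recorded if a segment is open and it contains ':', else dropped
          rcases List.eq_nil_or_concat segs with hnil | ⟨init, ⟨n, b⟩, hseg⟩
          · -- no open segment: both sides drop the line
            subst hnil
            have hcur : pzoLast ([] : List (String × List String)) = "" := rfl
            have eA : pzoStepA (pzoBuild [], pzoLast []) line = (pzoBuild [], pzoLast []) := by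
              unfold pzoStepA
              rw [if_neg h1, if_neg h2, if_neg h3, if_neg (by simp [hcur])]
            have eB : pzoStepB [] line = [] := by
              unfold pzoStepB; rw [if_neg h1, if_neg h2, if_neg h3]; rfl
            rw [eA, eB]; exact ih [] hrest hn
          · rw [List.concat_eq_append] at hseg
            subst hseg
            have hne : n ≠ "" := hn (n, b) (by simp)
            have hcur : pzoLast (init ++ [(n, b)]) = n := pzoLast_concat init n b
            have hbuild : pzoBuild (init ++ [(n, b)]) = (pzoBuild init).insert n (pzoBody b) :=
              pzoBuild_concat init n b
            have eB : pzoStepB (init ++ [(n, b)]) line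
                = init ++ [(n, b ++ [PySem.Str.strip line])] := by
              unfold pzoStepB
              rw [if_neg h1, if_neg h2, if_neg h3]
              rw [show (init ++ [(n, b)]).getLast? = some (n, b) from by simp]
              rw [show (init ++ [(n, b)]).dropLast = init from by simp]
            have hbody : pzoBody (b ++ [PySem.Str.strip line])
                = if PySem.Str.isIn ":" (PySem.Str.strip line) = true then
                    (pzoBody b).insert
                      (PySem.Str.strip
                        (((PySem.Str.splitMax? (PySem.Str.strip line) ":" 1).getD []).getD 0 ""))
                      (PySem.Str.strip
                        (((PySem.Str.splitMax? (PySem.Str.strip line) ":" 1).getD []).getD 1 ""))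
                  else pzoBody b := by
              simp only [pzoBody, List.foldl_append, List.foldl_cons, List.foldl_nil]
            have hnseg : ∀ p ∈ init ++ [(n, b ++ [PySem.Str.strip line])], p.1 ≠ "" := by
              intro p hp
              rcases List.mem_append.mp hp with hp | hp
              · exact hn p (by simp [hp])
              · simp at hp; subst hp; exact hne
            by_cases h4 : PySem.Str.isIn ":" (PySem.Str.strip line) = true
            · -- recorded key:value line
              have eA : pzoStepA (pzoBuild (init ++ [(n, b)]), pzoLast (init ++ [(n, b)])) line
                  = ((pzoBuild init).insert n
                      ((pzoBody b).insert
                        (PySem.Str.strip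
                          (((PySem.Str.splitMax? (PySem.Str.strip line) ":" 1).getD []).getD 0 ""))
                        (PySem.Str.strip
                          (((PySem.Str.splitMax? (PySem.Str.strip line) ":" 1).getD []).getD 1 ""))),
                     n) := by
                unfold pzoStepA
                rw [if_neg h1, if_neg h2, if_neg h3, hcur, hbuild,
                  if_pos (show (n != "" && PySem.Str.isIn ":" (PySem.Str.strip line)) = true
                    from by rw [Bool.and_eq_true]; exact ⟨bne_iff_ne.mpr hne, h4⟩)]
                simp only [PySem.Dict.modify]
                rw [PySem.Dict.getD_insert_self, PySem.Dict.insert_insert_self]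
              have key := ih (init ++ [(n, b ++ [PySem.Str.strip line])]) hrest hnseg
              rw [pzoBuild_concat, pzoLast_concat, hbody, if_pos h4] at key
              rw [eA, eB]
              exact key
            · -- line without ':': A drops it, B appends it but pass 2 filters it out
              have eA : pzoStepA (pzoBuild (init ++ [(n, b)]), pzoLast (init ++ [(n, b)])) line
                  = (pzoBuild (init ++ [(n, b)]), pzoLast (init ++ [(n, b)])) := by
                unfold pzoStepA
                rw [if_neg h1, if_neg h2, if_neg h3,
                  if_neg (fun hc => h4 (by
                    rw [Bool.and_eq_true] at hc
                    exact hc.2))]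
              have key := ih (init ++ [(n, b ++ [PySem.Str.strip line])]) hrest hnseg
              rw [pzoBuild_concat, pzoLast_concat, hbody, if_neg h4] at key
              rw [eA, eB, hcur, hbuild]
              exact key

-- ===== VERDICT (by name: the statement is the Claim_ definition above) =====
theorem parse_zonestatus_output_py_spec : Claim_equal_parse_zonestatus_output_py := by
  intro raw _hdom hpre
  unfold Spec_parse_zonestatus_output_py parse_zonestatus_output_py parse_zonestatus_output_py_alt
  have := pzo_main (PySem.Str.splitlines raw) [] hpre (by simp)
  simp only [pzoBuild, List.foldl_nil, pzoLast, List.getLast?_nil, Option.elim] at this ⊢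
  rw [this]
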